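-- pv_equiv track=rewrite | github.com/nguyentrann0703/skincare-ingredient-analyzer | chunker.py | dedup_retrieved_chunks
-- ===== SOURCE A (Python) =====
-- def dedup_retrieved_chunks(chunks: list[dict]) -> list[dict]:
--     """
--     Sau khi Weaviate trả về top-k chunks, dedup theo ingredient_name.
--     Nếu cùng 1 ingredient có cả summary + detail → ưu tiên giữ detail.
--
--     Args:
--         chunks: list of chunk dicts từ Weaviate response
--
--     Returns:
--         Deduplicated list
--     """
--     seen: dict[str, dict] = {}
--
--     for chunk in chunks:
--         name = chunk.get("ingredient_name", "")
--         if name not in seen: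
--             seen[name] = chunk
--         elif chunk.get("chunk_type") == "detail":
--             # Detail chunk có description đầy đủ hơn summary
--             seen[name] = chunk
--
--     return list(seen.values())
-- ===== SOURCE B (Python) =====
-- def dedup_retrieved_chunks(chunks: list[dict]) -> list[dict]:
--     # Two passes: group chunks by ingredient_name (first-occurrence key order),
--     # then pick per group the last 'detail' chunk, falling back to the first chunk.
--     groups: dict[str, list] = {}
--     for chunk in chunks:
--         groups.setdefault(chunk.get("ingredient_name", ""), []).append(chunk)
--     result = []
--     for group in groups.values():
--         details = [c for c in group if c.get("chunk_type") == "detail"]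
--         result.append(details[-1] if details else group[0])
--     return result
-- ===== Notes on version B (the rewrite author's own statement) =====
-- stated objective: alternative
-- what changed: Replaces A's single in-place running-representative dict with two passes: first group all chunks by ingredient_name in first-occurrence order, then reduce each group to the last 'detail' chunk or, failing that, the group's first chunk.
import Mathlib
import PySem

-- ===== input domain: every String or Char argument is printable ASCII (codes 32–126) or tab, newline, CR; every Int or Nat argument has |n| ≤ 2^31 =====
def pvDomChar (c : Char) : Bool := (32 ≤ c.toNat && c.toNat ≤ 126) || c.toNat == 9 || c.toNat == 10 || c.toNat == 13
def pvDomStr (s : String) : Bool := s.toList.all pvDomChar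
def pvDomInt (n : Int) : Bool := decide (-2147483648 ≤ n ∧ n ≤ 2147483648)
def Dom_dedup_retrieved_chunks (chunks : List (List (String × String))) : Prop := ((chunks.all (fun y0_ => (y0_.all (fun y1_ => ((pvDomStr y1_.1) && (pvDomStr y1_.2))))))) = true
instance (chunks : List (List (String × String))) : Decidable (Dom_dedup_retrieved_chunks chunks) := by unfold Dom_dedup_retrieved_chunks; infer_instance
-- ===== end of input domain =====

-- B differs only in structure (group-then-select instead of a running representative); same value everywhere.
-- chunk.get(k, dflt) / chunk.get(k) on a chunk dict (ported as an association list, first match wins)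
def chunkGet? (c : List (String × String)) (k : String) : Option String :=
  (c.find? (fun p => p.1 == k)).map (·.2)
def chunkGetD (c : List (String × String)) (k dflt : String) : String :=
  (chunkGet? c k).getD dflt

-- ===== PORT A =====
def dedup_retrieved_chunks (chunks : List (List (String × String))) : List (List (String × String)) :=
  (chunks.foldl (fun seen chunk =>
      let name := chunkGetD chunk "ingredient_name" ""
      if seen.contains name = false then seen.insert name chunk
      else if chunkGet? chunk "chunk_type" == some "detail" then seen.insert name chunk
      else seen)
    (PySem.Dict.empty : PySem.Dict String (List (String × String)))).values

-- ===== PORT B =====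
-- groups.setdefault(name, []).append(chunk)  ≡  modify name [] (· ++ [chunk])
def dedup_retrieved_chunks_alt (chunks : List (List (String × String))) : List (List (String × String)) :=
  let groups := chunks.foldl
    (fun d chunk => d.modify (chunkGetD chunk "ingredient_name" "") [] (· ++ [chunk]))
    (PySem.Dict.empty : PySem.Dict String (List (List (String × String))))
  groups.values.map (fun group =>
    let details := group.filter (fun c => chunkGet? c "chunk_type" == some "detail")
    -- details[-1] if details else group[0]; groups' values are never empty, headD is total form
    match details.getLast? with
    | some c => c
    | none => group.headD [])

-- ===== PRECONDITION & SPEC =====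
def Spec_dedup_retrieved_chunks (chunks : List (List (String × String))) (out : List (List (String × String))) : Prop := out = dedup_retrieved_chunks_alt chunks
instance (chunks : List (List (String × String))) (out : List (List (String × String))) : Decidable (Spec_dedup_retrieved_chunks chunks out) := by unfold Spec_dedup_retrieved_chunks; infer_instance

-- ===== CLAIM (what is proved, stated in full; the proofs are below) =====
def Claim_equal_dedup_retrieved_chunks : Prop := ∀ (chunks : List (List (String × String))), Dom_dedup_retrieved_chunks chunks → Spec_dedup_retrieved_chunks chunks (dedup_retrieved_chunks chunks)

-- ===== LEMMAS AND PROOFS =====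
def pvSel (g : List (List (String × String))) : List (String × String) :=
  match (g.filter (fun c => chunkGet? c "chunk_type" == some "detail")).getLast? with
  | some c => c
  | none => g.headD []

def pvStepA (seen : PySem.Dict String (List (String × String))) (chunk : List (String × String)) :
    PySem.Dict String (List (String × String)) :=
  let name := chunkGetD chunk "ingredient_name" ""
  if seen.contains name = false then seen.insert name chunk
  else if chunkGet? chunk "chunk_type" == some "detail" then seen.insert name chunk
  else seen

def pvStepG (d : PySem.Dict String (List (List (String × String)))) (chunk : List (String × String)) :
    PySem.Dict String (List (List (String × String))) :=
  d.modify (chunkGetD chunk "ingredient_name" "") [] (· ++ [chunk])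

theorem pvSel_singleton (c : List (String × String)) : pvSel [c] = c := by
  unfold pvSel
  cases h : chunkGet? c "chunk_type" == some "detail" <;> simp [List.filter, h]

theorem pvSel_append_detail (g : List (List (String × String))) (c : List (String × String))
    (h : (chunkGet? c "chunk_type" == some "detail") = true) : pvSel (g ++ [c]) = c := by
  unfold pvSel
  simp [List.filter_append, List.filter, h]

theorem pvSel_append_not_detail (g : List (List (String × String))) (c : List (String × String))
    (h : (chunkGet? c "chunk_type" == some "detail") = false) (hg : g ≠ []) :
    pvSel (g ++ [c]) = pvSel g := by
  unfold pvSel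
  rw [List.filter_append]
  simp only [List.filter, h]
  cases hfl : (g.filter (fun c => chunkGet? c "chunk_type" == some "detail")).getLast? with
  | some x => simp [hfl]
  | none =>
      cases g with
      | nil => exact absurd rfl hg
      | cons a as => simp [hfl]

theorem pvInv (l : List (List (String × String)))
    (dA : PySem.Dict String (List (String × String)))
    (dG : PySem.Dict String (List (List (String × String))))
    (hk : dA.keys = dG.keys)
    (hne : ∀ k, dG.contains k = true → dG.getD k [] ≠ [])
    (hval : ∀ k, dA.getD k [] = pvSel (dG.getD k [])) :
    (l.foldl pvStepA dA).keys = (l.foldl pvStepG dG).keys ∧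
    (∀ k, (l.foldl pvStepG dG).contains k = true → (l.foldl pvStepG dG).getD k [] ≠ []) ∧
    (∀ k, (l.foldl pvStepA dA).getD k [] = pvSel ((l.foldl pvStepG dG).getD k [])) := by
  induction l generalizing dA dG with
  | nil => exact ⟨hk, hne, hval⟩
  | cons c rest ih =>
      simp only [List.foldl_cons]
      have hG : pvStepG dG c = dG.modify (chunkGetD c "ingredient_name" "") [] (· ++ [c]) := rfl
      have hcont : dA.contains (chunkGetD c "ingredient_name" "") =
          dG.contains (chunkGetD c "ingredient_name" "") := by
        rw [PySem.Dict.contains_eq_decide_mem_keys, PySem.Dict.contains_eq_decide_mem_keys, hk]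
      cases hc : dG.contains (chunkGetD c "ingredient_name" "") with
      | false =>
          have hcA : dA.contains (chunkGetD c "ingredient_name" "") = false := by rw [hcont, hc]
          have hA : pvStepA dA c = dA.insert (chunkGetD c "ingredient_name" "") c := by
            simp [pvStepA, hcA]
          have hGgetD : dG.getD (chunkGetD c "ingredient_name" "") [] = [] :=
            PySem.Dict.getD_of_not_contains dG _ hc
          rw [hA, hG]
          apply ih
          · rw [PySem.Dict.keys_insert_of_not_contains dA c hcA,
              PySem.Dict.keys_modify, PySem.Dict.keys_insert_of_not_contains dG _ hc, hk]
          · intro k hk'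
            rw [PySem.Dict.contains_modify] at hk'
            rw [PySem.Dict.getD_modify]
            by_cases he : k = chunkGetD c "ingredient_name" ""
            · simp [he, hGgetD]
            · have hck : dG.contains k = true := by simpa [he] using hk'
              simpa [he] using hne k hck
          · intro k
            rw [PySem.Dict.getD_insert, PySem.Dict.getD_modify]
            by_cases he : k = chunkGetD c "ingredient_name" ""
            · simp [he, hGgetD, pvSel_singleton]
            · simpa [he] using hval k
      | true =>
          have hcA : dA.contains (chunkGetD c "ingredient_name" "") = true := by rw [hcont, hc]
          have hgne : dG.getD (chunkGetD c "ingredient_name" "") [] ≠ [] := hne _ hc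
          have hkeysG : (pvStepG dG c).keys = dG.keys := by
            rw [hG, PySem.Dict.keys_modify, PySem.Dict.keys_insert_of_contains dG _ hc]
          have hneG : ∀ k, (pvStepG dG c).contains k = true → (pvStepG dG c).getD k [] ≠ [] := by
            intro k hk'
            rw [hG, PySem.Dict.contains_modify] at hk'
            rw [hG, PySem.Dict.getD_modify]
            by_cases he : k = chunkGetD c "ingredient_name" ""
            · simp [he]
            · have hck : dG.contains k = true := by simpa [he] using hk'
              simpa [he] using hne k hck
          cases hp : chunkGet? c "chunk_type" == some "detail" with
          | true =>
              have hA : pvStepA dA c = dA.insert (chunkGetD c "ingredient_name" "") c := by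
                simp [pvStepA, hcA, hp]
              rw [hA]
              apply ih
              · rw [PySem.Dict.keys_insert_of_contains dA _ hcA, hkeysG, hk]
              · exact hneG
              · intro k
                rw [PySem.Dict.getD_insert, hG, PySem.Dict.getD_modify]
                by_cases he : k = chunkGetD c "ingredient_name" ""
                · simp [he, pvSel_append_detail _ _ hp]
                · simpa [he] using hval k
          | false =>
              have hA : pvStepA dA c = dA := by
                simp [pvStepA, hcA, hp]
              rw [hA]
              apply ih
              · rw [hkeysG, hk]
              · exact hneG
              · intro k
                rw [hG, PySem.Dict.getD_modify]
                by_cases he : k = chunkGetD c "ingredient_name" ""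
                · subst he; simp [pvSel_append_not_detail _ _ hp hgne]; exact hval _
                · simpa [he] using hval k

theorem portA_eq (chunks : List (List (String × String))) :
    dedup_retrieved_chunks chunks = (chunks.foldl pvStepA PySem.Dict.empty).values := rfl

theorem portB_eq (chunks : List (List (String × String))) :
    dedup_retrieved_chunks_alt chunks = (chunks.foldl pvStepG PySem.Dict.empty).values.map pvSel := rfl

-- ===== VERDICT (by name: the statement is the Claim_ definition above) =====
theorem dedup_retrieved_chunks_spec : Claim_equal_dedup_retrieved_chunks := by
  intro chunks _
  unfold Spec_dedup_retrieved_chunks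
  rw [portA_eq, portB_eq]
  obtain ⟨hk, hne, hval⟩ := pvInv chunks PySem.Dict.empty PySem.Dict.empty
    (by rw [PySem.Dict.keys_empty, PySem.Dict.keys_empty])
    (by intro k h; rw [PySem.Dict.contains_empty] at h; exact absurd h (by simp))
    (by intro k; rw [PySem.Dict.getD_empty, PySem.Dict.getD_empty]; rfl)
  have hndG : (chunks.foldl pvStepG PySem.Dict.empty).keys.Nodup := by
    have := PySem.Dict.nodup_keys_foldl_modify_key chunks
      (fun c => chunkGetD c "ingredient_name" "") ([] : List (List (String × String)))
      (fun _ c g => g ++ [c]) PySem.Dict.empty (by rw [PySem.Dict.keys_empty]; exact List.nodup_nil)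
    exact this
  have hndA : (chunks.foldl pvStepA PySem.Dict.empty).keys.Nodup := hk ▸ hndG
  rw [PySem.Dict.values_eq_map_keys _ hndA ([] : List (String × String)),
    PySem.Dict.values_eq_map_keys _ hndG ([] : List (List (String × String))), hk, List.map_map]
  apply List.map_congr_left
  intro k _
  exact hval k
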